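-- pv_equiv track=rewrite | github.com/mariosinnadamas/DAM-Python | CodeWars/PrinterErrors.py | printer_error
-- ===== SOURCE A (Python) =====
-- def printer_error(s):
--     letters = []
--     for i in s:
--         if 'a' <= i <= 'm' and i is not letters:
--             letters.append(i)
--
--     error = len(s) - len(letters)
--     cadena = str(error) + "/" + str(len(s))
--     return cadena
-- ===== SOURCE B (Python) =====
-- def printer_error(s):
--     freq = {}
--     for ch in s:
--         freq[ch] = freq.get(ch, 0) + 1
--     error = sum(v for k, v in freq.items() if not ('a' <= k <= 'm'))
--     return str(error) + "/" + str(len(s))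
-- ===== Notes on version B (the rewrite author's own statement) =====
-- stated objective: alternative
-- what changed: B builds a character frequency table in one pass and sums the counts of the distinct bad keys (those outside the good range), instead of A's per-character accumulation of good characters into a list and subtracting its length.
import Mathlib
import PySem

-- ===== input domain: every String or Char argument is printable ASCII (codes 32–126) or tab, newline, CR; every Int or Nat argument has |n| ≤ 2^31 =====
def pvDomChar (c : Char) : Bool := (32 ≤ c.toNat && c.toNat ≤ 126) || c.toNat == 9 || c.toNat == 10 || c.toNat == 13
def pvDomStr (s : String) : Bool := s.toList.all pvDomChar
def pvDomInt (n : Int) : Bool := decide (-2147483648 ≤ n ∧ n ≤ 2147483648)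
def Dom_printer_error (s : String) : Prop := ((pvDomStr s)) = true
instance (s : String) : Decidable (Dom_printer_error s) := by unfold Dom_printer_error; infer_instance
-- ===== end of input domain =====

-- B replaces A's accumulation of good characters into a list by a frequency table
-- summed over the distinct keys outside 'a'..'m' (objective: alternative).

-- ===== PORT A =====
-- 'i is not letters' compares a char with the list object and is always True, so the
-- test reduces to 'a' <= i <= 'm'.
def printer_error (s : String) : String :=
  let letters : List Char :=
    s.toList.foldl (fun acc i => if 'a' ≤ i ∧ i ≤ 'm' then acc ++ [i] else acc) []
  let error : Int := (PySem.Str.len s : Int) - (letters.length : Int)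
  PySem.Int.toStr error ++ "/" ++ PySem.Int.toStr (PySem.Str.len s)

-- ===== PORT B =====
def printer_error_alt (s : String) : String :=
  let freq : PySem.Dict Char Int :=
    s.toList.foldl (fun d ch => d.insert ch (d.getD ch 0 + 1)) PySem.Dict.empty
  let error : Int :=
    (freq.items.filter (fun kv => ¬ ('a' ≤ kv.1 ∧ kv.1 ≤ 'm'))).foldl
      (fun acc kv => acc + kv.2) 0
  PySem.Int.toStr error ++ "/" ++ PySem.Int.toStr (PySem.Str.len s)

-- ===== PRECONDITION & SPEC =====
def Spec_printer_error (s : String) (out : String) : Prop := out = printer_error_alt s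
instance (s : String) (out : String) : Decidable (Spec_printer_error s out) := by unfold Spec_printer_error; infer_instance

-- ===== CLAIM (what is proved, stated in full; the proofs are below) =====
def Claim_equal_printer_error : Prop := ∀ (s : String), Dom_printer_error s → Spec_printer_error s (printer_error s)

-- ===== LEMMAS AND PROOFS =====

-- the key arithmetic fact: both programs compute the same error count
theorem pv_error_eq (l : List Char) :
    (l.length : Int) -
      ((l.foldl (fun acc i => if 'a' ≤ i ∧ i ≤ 'm' then acc ++ [i] else acc) []).length : Int)
    =
    (((l.foldl (fun d ch => d.insert ch (d.getD ch 0 + 1))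
        (PySem.Dict.empty : PySem.Dict Char Int)).items.filter
          (fun kv => ¬ ('a' ≤ kv.1 ∧ kv.1 ≤ 'm'))).foldl (fun acc kv => acc + kv.2) 0) := by
  -- A's letters list is the filter of the good characters
  rw [PySem.List.foldl_append_ite_eq_filter]
  -- B's dict is Counter(l); its items are the distinct keys with their counts
  rw [PySem.Dict.foldl_insert_getD_add_one_eq_counter, PySem.Dict.items_counter]
  rw [List.filter_map, PySem.List.foldl_add (g := Prod.snd)]
  simp only [Function.comp_def, List.map_map, zero_add, List.nil_append]
  have hperm : (PySem.Set.ofList l : List Char).Perm l.dedup := by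
    rw [List.perm_ext_iff_of_nodup (PySem.Set.nodup_ofList l) l.nodup_dedup]
    intro a; rw [PySem.Set.mem_ofList, List.mem_dedup]
  have hperm2 :=
    ((hperm.filter (fun k => decide ¬('a' ≤ k ∧ k ≤ 'm'))).map
      (fun k => (List.count k l : Int))).sum_eq
  rw [hperm2]
  have hcast : ((l.dedup.filter (fun k => decide ¬('a' ≤ k ∧ k ≤ 'm'))).map
      (fun k => (List.count k l : Int))).sum
      = (((l.dedup.filter (fun k => decide ¬('a' ≤ k ∧ k ≤ 'm'))).map
      (fun k => List.count k l)).sum : Nat) := by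
    rw [Nat.cast_list_sum, List.map_map]; rfl
  have hfix : ((l.dedup.filter (fun k => decide ¬('a' ≤ k ∧ k ≤ 'm'))).map
      (fun k => List.count k l)).sum
      = List.countP (fun k => decide ¬('a' ≤ k ∧ k ≤ 'm')) l :=
    List.sum_map_count_dedup_filter_eq_countP _ l
  rw [hcast, hfix]
  have hsplit := l.length_eq_length_filter_add (fun x => decide ('a' ≤ x ∧ x ≤ 'm'))
  have hc : l.countP (fun k => decide ¬('a' ≤ k ∧ k ≤ 'm'))
      = (l.filter (fun x => !decide ('a' ≤ x ∧ x ≤ 'm'))).length := by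
    rw [List.countP_eq_length_filter]
    congr 1
    refine List.filter_congr (fun x _ => ?_)
    simp only [decide_not]
  rw [hc]
  omega

-- ===== VERDICT (by name: the statement is the Claim_ definition above) =====
theorem printer_error_spec : Claim_equal_printer_error := by
  intro s _
  unfold Spec_printer_error printer_error printer_error_alt
  simp only [PySem.Str.len_eq]
  rw [← pv_error_eq s.toList]
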